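-- pv_equiv track=rewrite | github.com/kuldeep6445/project_euler_solutions | 8th_foobar.py | create_map_me
-- ===== SOURCE A (Python) =====
-- def create_map_me(dimension , mpos ,distance):
--     map = [0]
--     final = []
--     horiz_box = int(distance/dimension[0] + 2)
--     add = [mpos[0]*2,(dimension[0]-mpos[0])*2]
--     check = 1
--     num = 0
--     for i in range(horiz_box):
--         num += add[check]
--         map.append(num)
--         if check ==1:
--             check = 0
--         else:
--             check = 1
--     num = 0
--     check = 0
--     for i in range(horiz_box):
--         num -= add[check]
--         map.append(num)
--         if check ==1:
--             check = 0
--         else: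
--             check = 1
--
--     verti_box = int(distance/dimension[1]+2)
--     add = [mpos[1]*2,(dimension[1]-mpos[1])*2]
--     for i in map:
--         check = 1
--         num = 0
--         if i!=0:
--             final.append([i,0])
--         for j in range(verti_box):
--             num += add[check]
--             final.append([i,num])
--             if check ==1:
--                 check = 0
--             else:
--                 check = 1
--         check = 0
--         num = 0
--         for j in range(verti_box):
--             num -= add[check]
--             final.append([i,num])
--             if check ==1:
--                 check = 0
--             else:
--                 check = 1
--     return final
-- ===== SOURCE B (Python) =====
-- def _bounce_offsets(a0, a1, n):
--     # closed-form alternating partial sums: forward a1,a0,a1,... then backward -a0,-a1,-a0,...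
--     up = [(k + 1) // 2 * a1 + k // 2 * a0 for k in range(1, n + 1)]
--     down = [-((k + 1) // 2 * a0 + k // 2 * a1) for k in range(1, n + 1)]
--     return up + down
--
-- def create_map_me(dimension, mpos, distance):
--     hb = int(distance / dimension[0] + 2)
--     vb = int(distance / dimension[1] + 2)
--     xs = [0] + _bounce_offsets(mpos[0] * 2, (dimension[0] - mpos[0]) * 2, hb)
--     ys = _bounce_offsets(mpos[1] * 2, (dimension[1] - mpos[1]) * 2, vb)
--     return [[x, y] for x in xs for y in (([0] if x != 0 else []) + ys)]
-- ===== Notes on version B (the rewrite author's own statement) =====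
-- stated objective: simpler
-- what changed: B replaces A's four accumulator loops with toggling check/num state by closed-form alternating-offset lists ((k+1)//2*a1 + k//2*a0) built once per axis, and produces the grid as a flat product over the precomputed y-offset list instead of re-running the inner scans for every x.
import Mathlib
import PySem

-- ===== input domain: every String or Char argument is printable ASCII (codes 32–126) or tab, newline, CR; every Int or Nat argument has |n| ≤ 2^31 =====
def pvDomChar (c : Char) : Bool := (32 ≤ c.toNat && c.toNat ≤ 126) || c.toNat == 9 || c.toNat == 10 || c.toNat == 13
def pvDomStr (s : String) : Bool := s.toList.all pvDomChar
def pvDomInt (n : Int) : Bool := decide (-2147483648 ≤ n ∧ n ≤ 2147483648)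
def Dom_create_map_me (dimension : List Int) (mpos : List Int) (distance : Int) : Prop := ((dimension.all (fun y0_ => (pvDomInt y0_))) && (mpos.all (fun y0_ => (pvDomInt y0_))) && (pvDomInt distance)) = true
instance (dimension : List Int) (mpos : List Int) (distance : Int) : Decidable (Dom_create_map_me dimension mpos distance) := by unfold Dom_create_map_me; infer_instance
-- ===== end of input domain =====

-- B builds the alternating-offset lists once by closed form and takes a flat product,
-- instead of A's per-x accumulator loops with a toggling check/num state (objective: simpler).

-- ===== PORT A =====
-- int(distance/dim + 2) is ported as truncdiv (distance + 2*dim) dim: exact for the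
-- |int| ≤ 2^31 domain (the double rounding error < 2^-21 cannot cross an integer boundary).
def create_map_me (dimension : List Int) (mpos : List Int) (distance : Int) : List (List Int) :=
  let map0 : List Int := [0]
  let final0 : List (List Int) := []
  let horiz_box : Int := PySem.Int.truncdiv (distance + 2 * PySem.List.pyGetD dimension 0 0) (PySem.List.pyGetD dimension 0 0)
  let add : List Int := [PySem.List.pyGetD mpos 0 0 * 2, (PySem.List.pyGetD dimension 0 0 - PySem.List.pyGetD mpos 0 0) * 2]
  let s1 := (PySem.List.pyRange 0 horiz_box 1).foldl
    (fun (st : List Int × Int × Int) (_ : Int) =>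
      (st.1 ++ [st.2.2 + PySem.List.pyGetD add st.2.1 0],
       (if st.2.1 == 1 then (0:Int) else 1),
       st.2.2 + PySem.List.pyGetD add st.2.1 0)) (map0, 1, 0)
  let s2 := (PySem.List.pyRange 0 horiz_box 1).foldl
    (fun (st : List Int × Int × Int) (_ : Int) =>
      (st.1 ++ [st.2.2 - PySem.List.pyGetD add st.2.1 0],
       (if st.2.1 == 1 then (0:Int) else 1),
       st.2.2 - PySem.List.pyGetD add st.2.1 0)) (s1.1, 0, 0)
  let map := s2.1
  let verti_box : Int := PySem.Int.truncdiv (distance + 2 * PySem.List.pyGetD dimension 1 0) (PySem.List.pyGetD dimension 1 0)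
  let add2 : List Int := [PySem.List.pyGetD mpos 1 0 * 2, (PySem.List.pyGetD dimension 1 0 - PySem.List.pyGetD mpos 1 0) * 2]
  map.foldl (fun final i =>
    let final1 := if i != 0 then final ++ [[i, 0]] else final
    let t1 := (PySem.List.pyRange 0 verti_box 1).foldl
      (fun (st : List (List Int) × Int × Int) (_ : Int) =>
        (st.1 ++ [[i, st.2.2 + PySem.List.pyGetD add2 st.2.1 0]],
         (if st.2.1 == 1 then (0:Int) else 1),
         st.2.2 + PySem.List.pyGetD add2 st.2.1 0)) (final1, 1, 0)
    let t2 := (PySem.List.pyRange 0 verti_box 1).foldl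
      (fun (st : List (List Int) × Int × Int) (_ : Int) =>
        (st.1 ++ [[i, st.2.2 - PySem.List.pyGetD add2 st.2.1 0]],
         (if st.2.1 == 1 then (0:Int) else 1),
         st.2.2 - PySem.List.pyGetD add2 st.2.1 0)) (t1.1, 0, 0)
    t2.1) final0

-- ===== PORT B =====
def bounce_offsets (a0 a1 : Int) (n : Int) : List Int :=
  ((PySem.List.pyRange 1 (n + 1) 1).map
    (fun k => PySem.Int.floordiv (k + 1) 2 * a1 + PySem.Int.floordiv k 2 * a0))
  ++ ((PySem.List.pyRange 1 (n + 1) 1).map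
    (fun k => -(PySem.Int.floordiv (k + 1) 2 * a0 + PySem.Int.floordiv k 2 * a1)))

def create_map_me_alt (dimension : List Int) (mpos : List Int) (distance : Int) : List (List Int) :=
  let hb : Int := PySem.Int.truncdiv (distance + 2 * PySem.List.pyGetD dimension 0 0) (PySem.List.pyGetD dimension 0 0)
  let vb : Int := PySem.Int.truncdiv (distance + 2 * PySem.List.pyGetD dimension 1 0) (PySem.List.pyGetD dimension 1 0)
  let xs : List Int := 0 :: bounce_offsets (PySem.List.pyGetD mpos 0 0 * 2) ((PySem.List.pyGetD dimension 0 0 - PySem.List.pyGetD mpos 0 0) * 2) hb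
  let ys : List Int := bounce_offsets (PySem.List.pyGetD mpos 1 0 * 2) ((PySem.List.pyGetD dimension 1 0 - PySem.List.pyGetD mpos 1 0) * 2) vb
  xs.flatMap (fun x => ((if x != 0 then [(0:Int)] else []) ++ ys).map (fun y => [x, y]))

-- ===== PRECONDITION & SPEC =====
-- Pre_ excludes exactly the inputs where A raises: lists shorter than 2 (IndexError) or a
-- zero entry of dimension (ZeroDivisionError).
def Pre_create_map_me (dimension : List Int) (mpos : List Int) (distance : Int) : Prop :=
  2 ≤ dimension.length ∧ 2 ≤ mpos.length ∧ dimension.getD 0 0 ≠ 0 ∧ dimension.getD 1 0 ≠ 0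
instance (dimension : List Int) (mpos : List Int) (distance : Int) : Decidable (Pre_create_map_me dimension mpos distance) := by unfold Pre_create_map_me; infer_instance
def pvWitness_create_map_me : List Int × List Int × Int := ([3, 2], [1, 1], 5)

def Spec_create_map_me (dimension : List Int) (mpos : List Int) (distance : Int) (out : List (List Int)) : Prop := out = create_map_me_alt dimension mpos distance
instance (dimension : List Int) (mpos : List Int) (distance : Int) (out : List (List Int)) : Decidable (Spec_create_map_me dimension mpos distance out) := by unfold Spec_create_map_me; infer_instance

-- ===== CLAIM (what is proved, stated in full; the proofs are below) =====
def Claim_equal_create_map_me : Prop := ∀ (dimension : List Int) (mpos : List Int) (distance : Int), Dom_create_map_me dimension mpos distance → Pre_create_map_me dimension mpos distance → Spec_create_map_me dimension mpos distance (create_map_me dimension mpos distance)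

-- ===== LEMMAS AND PROOFS =====

def pvS (a0 a1 : Int) (k : Nat) : Int := (((k + 1) / 2 : Nat) : Int) * a1 + ((k / 2 : Nat) : Int) * a0

lemma pvUpLoop {α : Type} (a0 a1 : Int) (e : Int → α) (n : Nat) (acc : List α) :
    (List.range n).foldl
      (fun (st : List α × Int × Int) (_ : Nat) =>
        (st.1 ++ [e (st.2.2 + PySem.List.pyGetD [a0, a1] st.2.1 0)],
         (if st.2.1 == 1 then (0:Int) else 1),
         st.2.2 + PySem.List.pyGetD [a0, a1] st.2.1 0)) (acc, 1, 0)
    = (acc ++ (List.range n).map (fun j => e (pvS a0 a1 (j + 1))),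
       (if n % 2 = 0 then (1:Int) else 0),
       pvS a0 a1 n) := by
  have g1 : PySem.List.pyGetD [a0, a1] (1:Int) 0 = a1 := by simp [pysem]
  have g0 : PySem.List.pyGetD [a0, a1] (0:Int) 0 = a0 := by simp [pysem]
  induction n with
  | zero => simp [pvS]
  | succ n ih =>
    rw [List.range_succ, List.foldl_append, ih, List.foldl_cons, List.foldl_nil,
        List.map_append, List.map_cons, List.map_nil]
    dsimp only
    rcases Nat.even_or_odd n with ⟨m, rfl⟩ | ⟨m, rfl⟩
    · have h1 : (m + m) % 2 = 0 := by omega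
      have h2 : (m + m + 1) % 2 ≠ 0 := by omega
      rw [if_pos h1, if_neg h2]
      simp only [g1, Prod.mk.injEq, BEq.rfl, if_true, List.append_assoc]
      have e1 : (m + m + 1) / 2 = m := by omega
      have e2 : (m + m) / 2 = m := by omega
      have e3 : (m + m + 1 + 1) / 2 = m + 1 := by omega
      simp only [pvS, e1, e2, e3]
      refine ⟨?_, by simp, ?_⟩ <;> · push_cast; ring_nf
    · have h1 : (2 * m + 1) % 2 ≠ 0 := by omega
      have h2 : (2 * m + 1 + 1) % 2 = 0 := by omega
      rw [if_neg h1, if_pos h2]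
      have hbe : ((0:Int) == 1) = false := by decide
      simp only [g0, Prod.mk.injEq, hbe, List.append_assoc]
      have e1 : (2 * m + 1 + 1) / 2 = m + 1 := by omega
      have e2 : (2 * m + 1) / 2 = m := by omega
      have e3 : (2 * m + 1 + 1 + 1) / 2 = m + 1 := by omega
      simp only [pvS, e1, e2, e3]
      refine ⟨?_, by simp, ?_⟩ <;> · push_cast; ring_nf

def pvT (a0 a1 : Int) (k : Nat) : Int := -((((k + 1) / 2 : Nat) : Int) * a0 + ((k / 2 : Nat) : Int) * a1)

lemma pvDownLoop {α : Type} (a0 a1 : Int) (e : Int → α) (n : Nat) (acc : List α) :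
    (List.range n).foldl
      (fun (st : List α × Int × Int) (_ : Nat) =>
        (st.1 ++ [e (st.2.2 - PySem.List.pyGetD [a0, a1] st.2.1 0)],
         (if st.2.1 == 1 then (0:Int) else 1),
         st.2.2 - PySem.List.pyGetD [a0, a1] st.2.1 0)) (acc, 0, 0)
    = (acc ++ (List.range n).map (fun j => e (pvT a0 a1 (j + 1))),
       (if n % 2 = 0 then (0:Int) else 1),
       pvT a0 a1 n) := by
  have g1 : PySem.List.pyGetD [a0, a1] (1:Int) 0 = a1 := by simp [pysem]
  have g0 : PySem.List.pyGetD [a0, a1] (0:Int) 0 = a0 := by simp [pysem]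
  induction n with
  | zero => simp [pvT]
  | succ n ih =>
    rw [List.range_succ, List.foldl_append, ih, List.foldl_cons, List.foldl_nil,
        List.map_append, List.map_cons, List.map_nil]
    dsimp only
    rcases Nat.even_or_odd n with ⟨m, rfl⟩ | ⟨m, rfl⟩
    · have h1 : (m + m) % 2 = 0 := by omega
      have h2 : (m + m + 1) % 2 ≠ 0 := by omega
      rw [if_pos h1, if_neg h2]
      have hbe : ((0:Int) == 1) = false := by decide
      simp only [g0, Prod.mk.injEq, hbe, List.append_assoc]
      have e1 : (m + m + 1) / 2 = m := by omega
      have e2 : (m + m) / 2 = m := by omega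
      have e3 : (m + m + 1 + 1) / 2 = m + 1 := by omega
      simp only [pvT, e1, e2, e3]
      refine ⟨?_, by simp, ?_⟩ <;> · push_cast; ring_nf
    · have h1 : (2 * m + 1) % 2 ≠ 0 := by omega
      have h2 : (2 * m + 1 + 1) % 2 = 0 := by omega
      rw [if_neg h1, if_pos h2]
      simp only [g1, Prod.mk.injEq, BEq.rfl, if_true, List.append_assoc]
      have e1 : (2 * m + 1 + 1) / 2 = m + 1 := by omega
      have e2 : (2 * m + 1) / 2 = m := by omega
      have e3 : (2 * m + 1 + 1 + 1) / 2 = m + 1 := by omega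
      simp only [pvT, e1, e2, e3]
      refine ⟨?_, by simp, ?_⟩ <;> · push_cast; ring_nf

lemma pvUpLoopId (a0 a1 : Int) (hb : Int) (acc : List Int) :
    (PySem.List.pyRange 0 hb 1).foldl
      (fun (st : List Int × Int × Int) (_ : Int) =>
        (st.1 ++ [st.2.2 + PySem.List.pyGetD [a0, a1] st.2.1 0],
         (if st.2.1 == 1 then (0:Int) else 1),
         st.2.2 + PySem.List.pyGetD [a0, a1] st.2.1 0)) (acc, 1, 0)
    = (acc ++ (List.range hb.toNat).map (fun j => pvS a0 a1 (j + 1)),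
       (if hb.toNat % 2 = 0 then (1:Int) else 0),
       pvS a0 a1 hb.toNat) := by
  rw [PySem.List.pyRange_one, List.foldl_map]
  have h : (hb - 0).toNat = hb.toNat := by omega
  rw [h]
  exact pvUpLoop a0 a1 (fun x => x) hb.toNat acc

lemma pvDownLoopId (a0 a1 : Int) (hb : Int) (acc : List Int) :
    (PySem.List.pyRange 0 hb 1).foldl
      (fun (st : List Int × Int × Int) (_ : Int) =>
        (st.1 ++ [st.2.2 - PySem.List.pyGetD [a0, a1] st.2.1 0],
         (if st.2.1 == 1 then (0:Int) else 1),
         st.2.2 - PySem.List.pyGetD [a0, a1] st.2.1 0)) (acc, 0, 0)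
    = (acc ++ (List.range hb.toNat).map (fun j => pvT a0 a1 (j + 1)),
       (if hb.toNat % 2 = 0 then (0:Int) else 1),
       pvT a0 a1 hb.toNat) := by
  rw [PySem.List.pyRange_one, List.foldl_map]
  have h : (hb - 0).toNat = hb.toNat := by omega
  rw [h]
  exact pvDownLoop a0 a1 (fun x => x) hb.toNat acc

lemma pvUpLoopPair (a0 a1 i : Int) (vb : Int) (acc : List (List Int)) :
    (PySem.List.pyRange 0 vb 1).foldl
      (fun (st : List (List Int) × Int × Int) (_ : Int) =>
        (st.1 ++ [[i, st.2.2 + PySem.List.pyGetD [a0, a1] st.2.1 0]],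
         (if st.2.1 == 1 then (0:Int) else 1),
         st.2.2 + PySem.List.pyGetD [a0, a1] st.2.1 0)) (acc, 1, 0)
    = (acc ++ (List.range vb.toNat).map (fun j => [i, pvS a0 a1 (j + 1)]),
       (if vb.toNat % 2 = 0 then (1:Int) else 0),
       pvS a0 a1 vb.toNat) := by
  rw [PySem.List.pyRange_one, List.foldl_map]
  have h : (vb - 0).toNat = vb.toNat := by omega
  rw [h]
  exact pvUpLoop a0 a1 (fun x => [i, x]) vb.toNat acc

lemma pvDownLoopPair (a0 a1 i : Int) (vb : Int) (acc : List (List Int)) :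
    (PySem.List.pyRange 0 vb 1).foldl
      (fun (st : List (List Int) × Int × Int) (_ : Int) =>
        (st.1 ++ [[i, st.2.2 - PySem.List.pyGetD [a0, a1] st.2.1 0]],
         (if st.2.1 == 1 then (0:Int) else 1),
         st.2.2 - PySem.List.pyGetD [a0, a1] st.2.1 0)) (acc, 0, 0)
    = (acc ++ (List.range vb.toNat).map (fun j => [i, pvT a0 a1 (j + 1)]),
       (if vb.toNat % 2 = 0 then (0:Int) else 1),
       pvT a0 a1 vb.toNat) := by
  rw [PySem.List.pyRange_one, List.foldl_map]
  have h : (vb - 0).toNat = vb.toNat := by omega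
  rw [h]
  exact pvDownLoop a0 a1 (fun x => [i, x]) vb.toNat acc

lemma pvBounceEq (a0 a1 : Int) (n : Int) :
    bounce_offsets a0 a1 n
      = (List.range n.toNat).map (fun j => pvS a0 a1 (j + 1))
        ++ (List.range n.toNat).map (fun j => pvT a0 a1 (j + 1)) := by
  unfold bounce_offsets
  rw [PySem.List.pyRange_one]
  have h : (n + 1 - 1).toNat = n.toNat := by omega
  rw [h, List.map_map, List.map_map]
  have key : ∀ k : Nat,
      (PySem.Int.floordiv ((1:Int) + k + 1) 2 = (((k + 2) / 2 : Nat) : Int))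
      ∧ (PySem.Int.floordiv ((1:Int) + k) 2 = (((k + 1) / 2 : Nat) : Int)) := by
    intro k
    constructor
    · have c : ((1:Int) + k + 1) = ((k + 2 : Nat) : Int) := by push_cast; ring
      rw [c]; exact_mod_cast PySem.Int.floordiv_natCast (k + 2) 2
    · have c : ((1:Int) + k) = ((k + 1 : Nat) : Int) := by push_cast; ring
      rw [c]; exact_mod_cast PySem.Int.floordiv_natCast (k + 1) 2
  congr 1
  · apply List.map_congr_left
    intro k _
    simp only [Function.comp_apply, (key k).1, (key k).2, pvS]
  · apply List.map_congr_left
    intro k _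
    simp only [Function.comp_apply, (key k).1, (key k).2, pvT]

theorem pvMain (dimension mpos : List Int) (distance : Int) :
    create_map_me dimension mpos distance = create_map_me_alt dimension mpos distance := by
  simp only [create_map_me, create_map_me_alt]
  rw [pvUpLoopId]
  dsimp only
  rw [pvDownLoopId]
  dsimp only
  rw [pvBounceEq, pvBounceEq]
  generalize PySem.Int.truncdiv (distance + 2 * PySem.List.pyGetD dimension 1 0) (PySem.List.pyGetD dimension 1 0) = vb
  generalize (PySem.List.pyGetD dimension 1 0 - PySem.List.pyGetD mpos 1 0) * 2 = b1
  generalize PySem.List.pyGetD mpos 1 0 * 2 = b0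
  generalize List.map (fun j => pvS (PySem.List.pyGetD mpos 0 0 * 2) ((PySem.List.pyGetD dimension 0 0 - PySem.List.pyGetD mpos 0 0) * 2) (j + 1)) (List.range (PySem.Int.truncdiv (distance + 2 * PySem.List.pyGetD dimension 0 0) (PySem.List.pyGetD dimension 0 0)).toNat) = la
  generalize List.map (fun j => pvT (PySem.List.pyGetD mpos 0 0 * 2) ((PySem.List.pyGetD dimension 0 0 - PySem.List.pyGetD mpos 0 0) * 2) (j + 1)) (List.range (PySem.Int.truncdiv (distance + 2 * PySem.List.pyGetD dimension 0 0) (PySem.List.pyGetD dimension 0 0)).toNat) = lb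
  refine Eq.trans (List.foldl_ext _ (fun (final : List (List Int)) (i : Int) => final ++ ((if (i != 0) = true then [[i, 0]] else []) ++ (List.map (fun j => [i, pvS b0 b1 (j + 1)]) (List.range vb.toNat) ++ List.map (fun j => [i, pvT b0 b1 (j + 1)]) (List.range vb.toNat)))) _ ?_) ?_
  · intro acc i _
    rw [pvUpLoopPair, pvDownLoopPair]
    dsimp only
    by_cases hi : (i != 0) = true <;> simp [hi, List.append_assoc]
  · rw [PySem.List.foldl_append_eq_flatMap, List.nil_append]
    rw [show ([0] ++ la ++ lb : List Int) = 0 :: (la ++ lb) by simp]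
    congr 1
    funext x
    by_cases hi : (x != 0) = true <;> simp [hi, List.map_map, Function.comp_def]

-- ===== VERDICT (by name: the statement is the Claim_ definition above) =====
theorem create_map_me_spec : Claim_equal_create_map_me := by
  intro dimension mpos distance _ _
  unfold Spec_create_map_me
  exact pvMain dimension mpos distance
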